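-- pv_equiv track=rewrite | github.com/JustyRodriguez/-LFP-Proyecto2_202100058 | LFP_Proyecto2_202100058/Proyecto 2_LFPB+_202100058/Proyecto 2 LFP.py | afd_comentario
-- ===== SOURCE A (Python) =====
-- def afd_comentario(lexema):
--     pat = "//.*"
--     tabla = ""
--     estado = 0
--     aceptacion = [2]
--
--     for char in lexema:
--         if estado == 0:
--             if char == "-":
--                 estado = 1
--             else:
--                 estado = -5
--         elif estado == 1:
--             if char == "-":
--                 estado = 2
--             else:
--                 estado = -5
--         elif estado == 2:
--             if char == "-":
--                 estado = 3
--             else: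
--                 estado = -5
--         elif estado == 3:
--             if char != "\n":
--                 estado = 3
--             else:
--                 estado = -5
--
--     if estado in aceptacion:
--         return True
--     else:
--         return False
-- ===== SOURCE B (Python) =====
-- def afd_comentario(lexema):
--     # Simpler: the DFA accepts exactly the two-character sequence '-','-'.
--     # list() preserves acceptance of any iterable of two dashes and the
--     # TypeError on non-iterables.
--     return list(lexema) == ["-", "-"]
-- ===== Notes on version B (the rewrite author's own statement) =====
-- stated objective: simpler
-- what changed: Replaced the hand-written DFA state loop by a single comparison of the materialized character sequence with ['-','-'], which is exactly the DFA's accepted language.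
import Mathlib
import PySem

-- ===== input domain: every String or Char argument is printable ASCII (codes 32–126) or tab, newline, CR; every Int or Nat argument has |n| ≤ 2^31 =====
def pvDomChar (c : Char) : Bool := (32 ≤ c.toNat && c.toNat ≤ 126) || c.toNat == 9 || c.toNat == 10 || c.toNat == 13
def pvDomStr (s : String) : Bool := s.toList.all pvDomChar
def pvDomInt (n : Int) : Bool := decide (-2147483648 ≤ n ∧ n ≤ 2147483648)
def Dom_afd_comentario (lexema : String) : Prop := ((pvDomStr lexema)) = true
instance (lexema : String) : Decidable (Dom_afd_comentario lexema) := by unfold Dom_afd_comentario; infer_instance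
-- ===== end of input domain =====

-- ===== PORT A =====
-- B replaces A's DFA loop with a direct comparison of the character list with ['-','-'] (simpler).
def afdStep (estado : Int) (c : Char) : Int :=
  if estado = 0 then (if c = '-' then 1 else -5)
  else if estado = 1 then (if c = '-' then 2 else -5)
  else if estado = 2 then (if c = '-' then 3 else -5)
  else if estado = 3 then (if c ≠ '\n' then 3 else -5)
  else estado

def afd_comentario (lexema : String) : Bool :=
  let aceptacion : List Int := [2]
  let estado := lexema.toList.foldl afdStep 0
  if estado ∈ aceptacion then true else false

-- ===== PORT B =====
def afd_comentario_alt (lexema : String) : Bool :=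
  lexema.toList == ['-', '-']

-- ===== PRECONDITION & SPEC =====
def Spec_afd_comentario (lexema : String) (out : Bool) : Prop := out = afd_comentario_alt lexema
instance (lexema : String) (out : Bool) : Decidable (Spec_afd_comentario lexema out) := by unfold Spec_afd_comentario; infer_instance

-- ===== CLAIM (what is proved, stated in full; the proofs are below) =====
def Claim_equal_afd_comentario : Prop := ∀ (lexema : String), Dom_afd_comentario lexema → Spec_afd_comentario lexema (afd_comentario lexema)

-- ===== LEMMAS AND PROOFS =====

-- ===== VERDICT (by name: the statement is the Claim_ definition above) =====
lemma afd_stuck (l : List Char) : l.foldl afdStep (-5) = -5 := by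
  induction l with
  | nil => rfl
  | cons c t ih => simpa [afdStep] using ih

lemma afd_from3 (l : List Char) : l.foldl afdStep 3 = 3 ∨ l.foldl afdStep 3 = -5 := by
  induction l with
  | nil => exact Or.inl rfl
  | cons c t ih =>
    by_cases h : c = '\n'
    · right; simpa [List.foldl, afdStep, h] using afd_stuck t
    · simpa [List.foldl, afdStep, h] using ih

lemma afd_from2_ne (c : Char) (t : List Char) : (c :: t).foldl afdStep 2 ≠ 2 := by
  by_cases h : c = '-'
  · simp only [List.foldl, afdStep, h]
    rcases afd_from3 t with h3 | h3 <;> simp_all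
  · simp only [List.foldl, afdStep]
    norm_num [h]
    simp [afd_stuck t]

lemma afd_main (l : List Char) :
    (if l.foldl afdStep 0 ∈ ([2] : List Int) then true else false) = (l == ['-', '-']) := by
  match l with
  | [] => rfl
  | [c] =>
    by_cases h : c = '-' <;> simp [afdStep, h]
  | c1 :: c2 :: t =>
    by_cases h1 : c1 = '-'
    · by_cases h2 : c2 = '-'
      · subst h1; subst h2
        simp only [List.foldl, afdStep]
        norm_num
        match t with
        | [] => simp
        | c :: t' => simpa using afd_from2_ne c t'
      · simp only [List.foldl, afdStep, h1]
        norm_num [h2]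
        simp [afd_stuck t, h2]
    · simp only [List.foldl, afdStep]
      norm_num [h1]
      simp [afd_stuck t, h1]

theorem afd_comentario_spec : Claim_equal_afd_comentario := by
  intro lexema _
  unfold Spec_afd_comentario afd_comentario afd_comentario_alt
  exact afd_main lexema.toList
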